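-- pv_equiv track=rewrite | github.com/benediktveith/xai-rag | src/modules/knowledge_graph/kgrag_ex_perturbations.py | _remove_direct_neighbors_only
-- ===== SOURCE A (Python) =====
-- from typing import List, Set, Tuple
--
-- def _remove_direct_neighbors_only(data: List[str]) -> List[str]:
--     idx_rm = set()
--     for i, v in enumerate(data):
--         if v == "__":
--             if i > 0 and data[i - 1] != "__":
--                 idx_rm.add(i - 1)
--             if i < len(data) - 1 and data[i + 1] != "__":
--                 idx_rm.add(i + 1)
--     return [v for i, v in enumerate(data) if i not in idx_rm]
-- ===== SOURCE B (Python) =====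
-- def _remove_direct_neighbors_only(data):
--     # Run-based algorithm: split the list into maximal runs of "__" markers and
--     # maximal runs of non-marker elements.  Marker runs are kept whole; a
--     # non-marker run loses its first element when it is preceded by a marker run
--     # and its last element when it is followed by one.
--     out = []
--     i = 0
--     n = len(data)
--     first = True
--     while i < n:
--         if data[i] == "__":
--             j = i
--             while j < n and data[j] == "__":
--                 j += 1
--             out.extend(data[i:j])
--         else:
--             j = i
--             while j < n and data[j] != "__":
--                 j += 1
--             run = data[i:j]
--             if not first:
--                 run = run[1:]
--             if j < n:
--                 run = run[:-1]
--             out.extend(run)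
--         i = j
--         first = False
--     return out
-- ===== Notes on version B (the rewrite author's own statement) =====
-- stated objective: alternative
-- what changed: Replaces A's build-a-removal-index-set-then-filter with a run-based algorithm: split the list into maximal runs of '__' markers and non-marker runs, keep marker runs whole, and trim a non-marker run's first element when preceded by a marker run and its last element when followed by one.
import Mathlib
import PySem

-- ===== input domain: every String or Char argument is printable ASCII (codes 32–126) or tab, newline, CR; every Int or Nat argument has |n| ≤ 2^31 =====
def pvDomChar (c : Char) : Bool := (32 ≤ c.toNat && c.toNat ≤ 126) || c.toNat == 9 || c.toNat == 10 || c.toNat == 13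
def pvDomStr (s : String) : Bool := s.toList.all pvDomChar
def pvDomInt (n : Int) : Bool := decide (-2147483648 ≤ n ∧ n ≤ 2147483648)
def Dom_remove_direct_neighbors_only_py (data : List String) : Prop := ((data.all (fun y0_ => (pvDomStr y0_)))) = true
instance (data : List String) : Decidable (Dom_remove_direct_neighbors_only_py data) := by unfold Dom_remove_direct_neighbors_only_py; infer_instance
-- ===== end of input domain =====

-- B replaces A's removal-index-set-then-filter with a run-based algorithm: the list
-- is split into maximal runs of "__" markers and non-marker runs; marker runs are
-- kept whole, non-marker runs are trimmed at the edges that touch a marker run.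


-- ===== PORT A =====
-- one body of A's loop: 'if v == "__": if i > 0 and data[i-1] != "__": add(i-1); if i < len-1 and data[i+1] != "__": add(i+1)'
-- (data[i-1]/data[i+1] are in range under those guards, so pyGetD is exact there)
def aStep (data : List String) (s : PySem.Set Int) (iv : Int × String) : PySem.Set Int :=
  if iv.2 = "__" then
    let s1 := if 0 < iv.1 ∧ PySem.List.pyGetD data (iv.1 - 1) "" ≠ "__" then PySem.Set.add s (iv.1 - 1) else s
    if iv.1 < (data.length : Int) - 1 ∧ PySem.List.pyGetD data (iv.1 + 1) "" ≠ "__" then PySem.Set.add s1 (iv.1 + 1) else s1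
  else s

-- idx_rm after A's first loop
def aIdxRm (data : List String) : PySem.Set Int :=
  (PySem.List.enumerate data).foldl (aStep data) PySem.Set.empty

def remove_direct_neighbors_only_py (data : List String) : List String :=
  ((PySem.List.enumerate data).filter (fun iv => !(decide (iv.1 ∈ aIdxRm data)))).map (·.2)

-- ===== PORT B =====
-- the run loop of Source B: 'run = data[i:j]' for a maximal marker / non-marker run is
-- takeWhile, 'data[j:]' is dropWhile; 'run[1:]' is tail, 'run[:-1]' is dropLast
def bGo (first : Bool) (rest : List String) : List String :=
  match rest with
  | [] => []
  | x :: t =>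
    if x = "__" then
      ((x :: t).takeWhile (fun y => y == "__")) ++
        bGo false ((x :: t).dropWhile (fun y => y == "__"))
    else
      let run := (x :: t).takeWhile (fun y => y != "__")
      let rest' := (x :: t).dropWhile (fun y => y != "__")
      let run1 := if first then run else run.tail
      let run2 := if rest' = [] then run1 else run1.dropLast
      run2 ++ bGo false rest'
termination_by rest.length
decreasing_by
  · rename_i hx
    simp only [List.dropWhile, List.length_cons]
    rw [show (x == "__") = true by simp [hx]]
    exact Nat.lt_succ_of_le (List.length_dropWhile_le _ _)
  · rename_i hx
    simp only [List.dropWhile, List.length_cons]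
    rw [show (x != "__") = true by simp [hx]]
    exact Nat.lt_succ_of_le (List.length_dropWhile_le _ _)

def remove_direct_neighbors_only_py_alt (data : List String) : List String :=
  bGo true data

-- ===== PRECONDITION & SPEC =====
def Spec_remove_direct_neighbors_only_py (data : List String) (out : List String) : Prop := out = remove_direct_neighbors_only_py_alt data
instance (data : List String) (out : List String) : Decidable (Spec_remove_direct_neighbors_only_py data out) := by unfold Spec_remove_direct_neighbors_only_py; infer_instance

-- ===== CLAIM =====
def Claim_equal_remove_direct_neighbors_only_py : Prop := ∀ (data : List String), Dom_remove_direct_neighbors_only_py data → Spec_remove_direct_neighbors_only_py data (remove_direct_neighbors_only_py data)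

-- ===== LEMMAS AND PROOFS =====

theorem pyGetD_nat (data : List String) (m : Nat) (hm : m < data.length) :
    PySem.List.pyGetD data (m : Int) "" = data[m] := by
  simp [PySem.List.pyGetD_natCast, List.getD_eq_getElem?_getD, hm]

-- which indices one loop body of A adds
def aAdds (data : List String) (iv : Int × String) (k : Int) : Prop :=
  iv.2 = "__" ∧
    ((k = iv.1 - 1 ∧ 0 < iv.1 ∧ PySem.List.pyGetD data (iv.1 - 1) "" ≠ "__") ∨
     (k = iv.1 + 1 ∧ iv.1 < (data.length : Int) - 1 ∧ PySem.List.pyGetD data (iv.1 + 1) "" ≠ "__"))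

theorem mem_aStep (data : List String) (s : PySem.Set Int) (iv : Int × String) (k : Int) :
    k ∈ aStep data s iv ↔ aAdds data iv k ∨ k ∈ s := by
  unfold aStep aAdds
  split_ifs <;> simp_all [PySem.Set.mem_add] <;> tauto

theorem mem_foldl_aStep (data : List String) (l : List (Int × String)) (s : PySem.Set Int) (k : Int) :
    k ∈ l.foldl (aStep data) s ↔ k ∈ s ∨ ∃ iv ∈ l, aAdds data iv k := by
  induction l generalizing s with
  | nil => simp
  | cons iv t ih =>
    rw [List.foldl_cons, ih, mem_aStep]
    simp only [List.mem_cons]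
    constructor
    · rintro ((h | h) | ⟨jv, hj, ha⟩)
      · exact Or.inr ⟨iv, Or.inl rfl, h⟩
      · exact Or.inl h
      · exact Or.inr ⟨jv, Or.inr hj, ha⟩
    · rintro (h | ⟨jv, (rfl | hj), ha⟩)
      · exact Or.inl (Or.inr h)
      · exact Or.inl (Or.inl ha)
      · exact Or.inr ⟨jv, hj, ha⟩

-- Option.getD bridge: comparing a defaulted lookup with "__" is comparing the Option
theorem getD_str_iff (o : Option String) : (o.getD "" = "__") ↔ o = some "__" := by
  cases o <;> simp

theorem pyGetD_left_iff (data : List String) (k : Nat) :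
    (0 < (k : Int) ∧ PySem.List.pyGetD data ((k : Int) - 1) "" = "__") ↔
      (0 < k ∧ data[k - 1]? = some "__") := by
  constructor
  · rintro ⟨h0, he⟩
    have hk0 : 0 < k := by exact_mod_cast h0
    refine ⟨hk0, ?_⟩
    rw [show ((k : Int) - 1) = ((k - 1 : Nat) : Int) by omega,
      PySem.List.pyGetD_natCast, List.getD_eq_getElem?_getD] at he
    exact (getD_str_iff _).mp he
  · rintro ⟨hk0, he⟩
    refine ⟨by exact_mod_cast hk0, ?_⟩
    rw [show ((k : Int) - 1) = ((k - 1 : Nat) : Int) by omega,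
      PySem.List.pyGetD_natCast, List.getD_eq_getElem?_getD, he]
    rfl

theorem pyGetD_right_iff (data : List String) (k : Nat) :
    ((k : Int) < (data.length : Int) - 1 ∧ PySem.List.pyGetD data ((k : Int) + 1) "" = "__") ↔
      (k + 1 < data.length ∧ data[k + 1]? = some "__") := by
  rw [show ((k : Int) + 1) = ((k + 1 : Nat) : Int) by omega,
    PySem.List.pyGetD_natCast, List.getD_eq_getElem?_getD, getD_str_iff]
  constructor
  · rintro ⟨h, he⟩; exact ⟨by omega, he⟩
  · rintro ⟨h, he⟩; exact ⟨by omega, he⟩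

-- the characterization of A's removal set, in its raw pyGetD form
theorem mem_idx_rm_py (data : List String) (k : Nat) (hk : k < data.length) :
    ((k : Int) ∈ aIdxRm data) ↔
      (data[k] ≠ "__" ∧
        ((0 < (k : Int) ∧ PySem.List.pyGetD data ((k : Int) - 1) "" = "__") ∨
         ((k : Int) < (data.length : Int) - 1 ∧ PySem.List.pyGetD data ((k : Int) + 1) "" = "__"))) := by
  rw [aIdxRm, mem_foldl_aStep]
  simp only [PySem.Set.empty, List.not_mem_nil, false_or]
  constructor
  · rintro ⟨iv, hmem, hv, hcase⟩
    rw [PySem.List.mem_enumerate_iff] at hmem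
    obtain ⟨m, hm, rfl⟩ := hmem
    simp only [zero_add] at hv hcase ⊢
    rcases hcase with ⟨hke, hpos, hne⟩ | ⟨hke, hlt, hne⟩
    · have hm' : m = k + 1 := by omega
      subst hm'
      rw [show ((k + 1 : Nat) : Int) - 1 = ((k : Nat) : Int) by push_cast; ring,
        pyGetD_nat data k hk] at hne
      refine ⟨hne, Or.inr ⟨by omega, ?_⟩⟩
      rw [show ((k : Nat) : Int) + 1 = ((k + 1 : Nat) : Int) by push_cast; ring,
        pyGetD_nat data (k + 1) hm]
      exact hv
    · have hpos : 0 < k := by omega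
      have hm' : m = k - 1 := by omega
      subst hm'
      rw [show ((k - 1 : Nat) : Int) + 1 = ((k : Nat) : Int) by omega,
        pyGetD_nat data k hk] at hne
      refine ⟨hne, Or.inl ⟨by omega, ?_⟩⟩
      rw [show ((k : Nat) : Int) - 1 = ((k - 1 : Nat) : Int) by omega,
        pyGetD_nat data (k - 1) hm]
      exact hv
  · rintro ⟨hne, ⟨hpos, heq⟩ | ⟨hlt, heq⟩⟩
    · have hpos' : 0 < k := by exact_mod_cast hpos
      have hm : k - 1 < data.length := by omega
      refine ⟨(((k - 1 : Nat) : Int), data[k - 1]), ?_, ?_, Or.inr ⟨by omega, by omega, ?_⟩⟩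
      · rw [PySem.List.mem_enumerate_iff]
        exact ⟨k - 1, hm, by simp⟩
      · rw [show (data[k - 1] : String) = PySem.List.pyGetD data (((k - 1 : Nat) : Int)) "" from
          (pyGetD_nat data (k - 1) hm).symm,
          show (((k - 1 : Nat) : Int)) = (k : Int) - 1 by omega]
        exact heq
      · rw [show ((k - 1 : Nat) : Int) + 1 = ((k : Nat) : Int) by omega, pyGetD_nat data k hk]
        exact hne
    · have hm : k + 1 < data.length := by omega
      refine ⟨(((k + 1 : Nat) : Int), data[k + 1]), ?_, ?_, Or.inl ⟨by push_cast; ring, by push_cast at hlt ⊢; omega, ?_⟩⟩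
      · rw [PySem.List.mem_enumerate_iff]
        exact ⟨k + 1, hm, by simp⟩
      · rw [show (data[k + 1] : String) = PySem.List.pyGetD data (((k + 1 : Nat) : Int)) "" from
          (pyGetD_nat data (k + 1) hm).symm,
          show (((k + 1 : Nat) : Int)) = (k : Int) + 1 by push_cast; ring]
        exact heq
      · rw [show ((k + 1 : Nat) : Int) - 1 = ((k : Nat) : Int) by push_cast; ring, pyGetD_nat data k hk]
        exact hne

-- the characterization of A's removal set, for an in-range index k
theorem mem_idx_rm (data : List String) (k : Nat) (hk : k < data.length) :
    ((k : Int) ∈ aIdxRm data) ↔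
      (data[k] ≠ "__" ∧
        ((0 < k ∧ data[k - 1]? = some "__") ∨
         (k + 1 < data.length ∧ data[k + 1]? = some "__"))) := by
  rw [mem_idx_rm_py data k hk, pyGetD_left_iff, pyGetD_right_iff]

-- keep condition of the common index-based description
abbrev keepB (data : List String) (k : Nat) (x : String) : Prop :=
  x = "__" ∨ ¬((0 < k ∧ data[k - 1]? = some "__") ∨ (k + 1 < data.length ∧ data[k + 1]? = some "__"))

-- index-based filter (the common spec both ports are reduced to)
def idxFilt (data : List String) (k : Nat) : List String → List String
  | [] => []
  | x :: t => if keepB data k x then x :: idxFilt data (k + 1) t else idxFilt data (k + 1) t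

-- filtering the enumerated list by (non-)membership in idx_rm is the index filter
theorem filt_eq (data : List String) :
    ∀ (t : List String) (k : Nat),
      (∀ (j : Nat) (hj : j < t.length),
        (((k + j : Nat) : Int) ∈ aIdxRm data ↔ ¬ keepB data (k + j) t[j])) →
      ((PySem.List.enumerate t ((k : Nat) : Int)).filter
          (fun iv => !(decide (iv.1 ∈ aIdxRm data)))).map (·.2) = idxFilt data k t := by
  intro t
  induction t with
  | nil => intro k _; simp [idxFilt, PySem.List.enumerate_nil]
  | cons x t ih =>
    intro k h
    rw [PySem.List.enumerate_cons]
    have h0 := h 0 (by simp)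
    simp only [Nat.add_zero, List.getElem_cons_zero] at h0
    by_cases hkeep : keepB data k x
    · have : ((k : Int) ∈ aIdxRm data) = False := by simp [h0, hkeep]
      simp only [List.filter_cons, this, decide_false, Bool.not_false, if_true, List.map_cons,
        idxFilt, if_pos hkeep]
      rw [show ((k : Nat) : Int) + 1 = ((k + 1 : Nat) : Int) by push_cast; ring]
      congr 1
      apply ih
      intro j hj
      have := h (j + 1) (by simpa using hj)
      simpa [Nat.add_comm, Nat.add_assoc, Nat.add_left_comm] using this
    · have : ((k : Int) ∈ aIdxRm data) = True := by simp [h0, hkeep]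
      simp only [List.filter_cons, this, decide_true, Bool.not_true, idxFilt, if_neg hkeep]
      rw [show ((k : Nat) : Int) + 1 = ((k + 1 : Nat) : Int) by push_cast; ring]
      apply ih
      intro j hj
      have := h (j + 1) (by simpa using hj)
      simpa [Nat.add_comm, Nat.add_assoc, Nat.add_left_comm] using this

-- A equals the index filter
theorem A_eq_idxFilt (data : List String) :
    remove_direct_neighbors_only_py data = idxFilt data 0 data := by
  unfold remove_direct_neighbors_only_py
  have := filt_eq data data 0 ?_
  · simpa using this
  · intro j hj
    simp only [Nat.zero_add]
    rw [mem_idx_rm data j hj]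
    unfold keepB
    constructor
    · rintro ⟨h1, h2⟩ hk
      rcases hk with hk | hk
      · exact h1 hk
      · exact hk h2
    · intro h
      by_cases hx : data[j] = "__"
      · exact absurd (Or.inl hx) h
      · refine ⟨hx, ?_⟩
        by_contra hc
        exact h (Or.inr hc)

-- marker runs pass through idxFilt untouched
theorem idxFilt_markers (data : List String) (run rest' : List String)
    (h : ∀ x ∈ run, x = "__") (k : Nat) :
    idxFilt data k (run ++ rest') = run ++ idxFilt data (k + run.length) rest' := by
  induction run generalizing k with
  | nil => simp
  | cons x t ih =>
    have hx : x = "__" := h x (by simp)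
    subst hx
    simp only [List.cons_append, idxFilt, keepB]
    rw [if_pos (Or.inl trivial), ih (fun y hy => h y (by simp [hy])),
      List.length_cons, show k + (t.length + 1) = (k + 1) + t.length by omega]

theorem idxFilt_cons_keep (data : List String) (k : Nat) (x : String) (t : List String)
    (h : keepB data k x) : idxFilt data k (x :: t) = x :: idxFilt data (k + 1) t := by
  simp [idxFilt, h]

theorem idxFilt_cons_drop (data : List String) (k : Nat) (x : String) (t : List String)
    (h : ¬ keepB data k x) : idxFilt data k (x :: t) = idxFilt data (k + 1) t := by
  simp [idxFilt, h]

theorem getLast?_all_marker (run : List String) (h : run ≠ []) (hall : ∀ x ∈ run, x = "__") :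
    run.getLast? = some "__" := by
  rw [List.getLast?_eq_some_getLast h]
  exact congrArg some (hall _ (List.getLast_mem h))

-- a non-marker element whose left neighbor exists and is not "__" is kept iff its
-- right neighbor is absent or not "__" — the tail of a non-marker run
theorem idxFilt_run_tail (data rest' : List String)
    (hrest : rest' = [] ∨ rest'.head? = some "__") :
    ∀ (t pre : List String) (y : String),
      data = pre ++ t ++ rest' →
      pre.getLast? = some y → y ≠ "__" →
      (∀ x ∈ t, x ≠ "__") →
      idxFilt data pre.length (t ++ rest') =
        (if rest' = [] then t else t.dropLast) ++ idxFilt data (pre.length + t.length) rest' := by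
  intro t
  induction t with
  | nil =>
    intro pre y hd hy hyne _
    simp only [List.nil_append, List.length_nil, Nat.add_zero]
    split <;> simp
  | cons x t ih =>
    intro pre y hd hy hyne hall
    have hxne : x ≠ "__" := hall x (by simp)
    have hpre_ne : pre ≠ [] := by intro hc; subst hc; simp at hy
    have hpre_pos : 0 < pre.length := List.length_pos_iff.mpr hpre_ne
    have hleft : data[pre.length - 1]? = some y := by
      rw [hd, List.getElem?_append_left (by simp; omega : pre.length - 1 < (pre ++ (x :: t)).length),
        List.getElem?_append_left (by omega : pre.length - 1 < pre.length),
        ← List.getLast?_eq_getElem?, hy]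
    have hleft_ne : ¬ (0 < pre.length ∧ data[pre.length - 1]? = some "__") := by
      rintro ⟨-, hc⟩
      rw [hleft] at hc
      exact hyne (Option.some.inj hc)
    cases t with
    | nil =>
      rcases hrest with hre | hre
      · subst hre
        have hlen : data.length = pre.length + 1 := by simp [hd]
        have hkeep : keepB data pre.length x := by
          unfold keepB
          refine Or.inr ?_
          rintro (hc | ⟨hc, -⟩)
          · exact hleft_ne hc
          · omega
        rw [show (x :: ([] : List String)) ++ ([] : List String) = [x] by simp,
          idxFilt_cons_keep data _ _ _ hkeep]
        simp [idxFilt]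
      · obtain ⟨z, r, rfl⟩ : ∃ z r, rest' = z :: r := by
          cases rest' with
          | nil => simp at hre
          | cons z r => exact ⟨z, r, rfl⟩
        have hz : z = "__" := by simpa using hre
        have hright : data[pre.length + 1]? = some "__" := by
          rw [hd, show pre ++ [x] ++ (z :: r) = (pre ++ [x]) ++ (z :: r) by simp,
            List.getElem?_append_right (by simp : (pre ++ [x]).length ≤ pre.length + 1)]
          simp [hz]
        have hlen : pre.length + 1 < data.length := by simp [hd]
        have hdrop : ¬ keepB data pre.length x := by
          unfold keepB
          rintro (hc | hc)
          · exact hxne hc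
          · exact hc (Or.inr ⟨hlen, hright⟩)
        rw [List.cons_append, List.nil_append, idxFilt_cons_drop data _ _ _ hdrop]
        simp
    | cons x2 t2 =>
      have hx2ne : x2 ≠ "__" := hall x2 (by simp)
      have hright : data[pre.length + 1]? = some x2 := by
        rw [hd, List.getElem?_append_left
            (by simp : pre.length + 1 < (pre ++ (x :: x2 :: t2)).length),
          List.getElem?_append_right (by omega : pre.length ≤ pre.length + 1)]
        simp
      have hkeep : keepB data pre.length x := by
        unfold keepB
        refine Or.inr ?_
        rintro (hc | ⟨-, hc⟩)
        · exact hleft_ne hc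
        · rw [hright] at hc
          exact hx2ne (Option.some.inj hc)
      rw [List.cons_append, idxFilt_cons_keep data _ _ _ hkeep]
      have hd' : data = (pre ++ [x]) ++ (x2 :: t2) ++ rest' := by simp [hd]
      have := ih (pre ++ [x]) x hd' List.getLast?_concat hxne
        (fun z hz => hall z (by simp [hz]))
      rw [List.length_append, List.length_cons, List.length_nil] at this
      rw [this]
      have hlen2 : pre.length + (x :: x2 :: t2).length = pre.length + 1 + (x2 :: t2).length := by
        simp; omega
      rw [hlen2]
      split
      · rfl
      · rw [List.dropLast_cons_of_ne_nil (by simp : x2 :: t2 ≠ []), List.cons_append]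

-- a whole non-marker run: trimmed at the front when preceded by a marker, at the
-- back when followed by one
theorem idxFilt_run (data rest' : List String)
    (hrest : rest' = [] ∨ rest'.head? = some "__") :
    ∀ (run pre : List String),
      data = pre ++ run ++ rest' →
      run ≠ [] → (∀ x ∈ run, x ≠ "__") →
      (pre = [] ∨ pre.getLast? = some "__") →
      idxFilt data pre.length (run ++ rest') =
        (if rest' = [] then (if pre.isEmpty then run else run.tail)
         else (if pre.isEmpty then run else run.tail).dropLast) ++
          idxFilt data (pre.length + run.length) rest' := by
  rintro ⟨⟩ pre hd hne hall hpre
  · exact absurd rfl hne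
  rename_i x t
  have hxne : x ≠ "__" := hall x (by simp)
  rcases hpre with rfl | hpre
  · -- start of the list: no left neighbor, first element kept unless right one is "__"
    simp only [List.nil_append] at hd ⊢
    simp only [List.isEmpty_nil, if_true, List.length_nil]
    have hleft_ne : ¬ ((0 : Nat) > 0 ∧ data[(0 : Nat) - 1]? = some "__") := by omega
    cases t with
    | nil =>
      rcases hrest with hre | hre
      · subst hre
        have hlen : data.length = 1 := by simp [hd]
        have hkeep : keepB data 0 x := by
          unfold keepB
          refine Or.inr ?_
          rintro (⟨hc, -⟩ | ⟨hc, -⟩) <;> omega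
        simp [idxFilt_cons_keep data _ _ _ hkeep, idxFilt]
      · obtain ⟨z, r, rfl⟩ : ∃ z r, rest' = z :: r := by
          cases rest' with
          | nil => simp at hre
          | cons z r => exact ⟨z, r, rfl⟩
        have hz : z = "__" := by simpa using hre
        have hright : data[(1 : Nat)]? = some "__" := by
          rw [hd, List.getElem?_append_right (by simp : ([x] : List String).length ≤ 1)]
          simp [hz]
        have hdrop : ¬ keepB data 0 x := by
          unfold keepB
          rintro (hc | hc)
          · exact hxne hc
          · exact hc (Or.inr ⟨by simp [hd], hright⟩)
        rw [List.cons_append, List.nil_append, idxFilt_cons_drop data _ _ _ hdrop]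
        simp
    | cons x2 t2 =>
      have hx2ne : x2 ≠ "__" := hall x2 (by simp)
      have hright : data[(1 : Nat)]? = some x2 := by
        rw [hd, List.getElem?_append_left (by simp : 1 < (x :: x2 :: t2).length)]
        rfl
      have hkeep : keepB data 0 x := by
        unfold keepB
        refine Or.inr ?_
        rintro (⟨hc, -⟩ | ⟨-, hc⟩)
        · omega
        · rw [hright] at hc
          exact hx2ne (Option.some.inj hc)
      rw [List.cons_append, idxFilt_cons_keep data _ _ _ hkeep]
      have hd' : data = ([x] : List String) ++ (x2 :: t2) ++ rest' := by simpa using hd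
      have := idxFilt_run_tail data rest' hrest (x2 :: t2) [x] x hd'
        (by rfl) hxne (fun z hz => hall z (by simp [hz]))
      simp only [List.length_cons, List.length_nil] at this
      rw [show (0 : Nat) + 1 = 1 by rfl, this]
      rw [show (0 : Nat) + (x :: x2 :: t2).length = 1 + (x2 :: t2).length by simp; omega]
      split
      · simp
      · rw [List.dropLast_cons_of_ne_nil (by simp : x2 :: t2 ≠ [])]
        simp
  · -- preceded by a marker: first element of the run is dropped
    have hpre_ne : pre ≠ [] := by intro hc; subst hc; simp at hpre
    have hpre_pos : 0 < pre.length := List.length_pos_iff.mpr hpre_ne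
    have hleft : data[pre.length - 1]? = some "__" := by
      rw [hd, List.getElem?_append_left (by simp; omega : pre.length - 1 < (pre ++ (x :: t)).length),
        List.getElem?_append_left (by omega : pre.length - 1 < pre.length),
        ← List.getLast?_eq_getElem?, hpre]
    have hdrop : ¬ keepB data pre.length x := by
      unfold keepB
      rintro (hc | hc)
      · exact hxne hc
      · exact hc (Or.inl ⟨hpre_pos, hleft⟩)
    have hemp : pre.isEmpty = false := by simpa [List.isEmpty_iff] using hpre_ne
    rw [List.cons_append, idxFilt_cons_drop data _ _ _ hdrop]
    simp only [hemp, Bool.false_eq_true, if_neg (by simp : ¬ False), List.tail_cons]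
    cases t with
    | nil =>
      simp only [List.nil_append, List.length_cons, List.length_nil]
      split <;> simp
    | cons x2 t2 =>
      have hd' : data = (pre ++ [x]) ++ (x2 :: t2) ++ rest' := by simp [hd]
      have := idxFilt_run_tail data rest' hrest (x2 :: t2) (pre ++ [x]) x hd'
        List.getLast?_concat hxne (fun z hz => hall z (by simp [hz]))
      rw [List.length_append, List.length_cons, List.length_nil] at this
      rw [this, show pre.length + (x :: x2 :: t2).length = pre.length + 1 + (x2 :: t2).length by
        simp; omega]

-- the main invariant of B's run loop against the index filter
theorem bGo_eq_idxFilt (data : List String) :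
    ∀ (n : Nat) (rest pre : List String), rest.length ≤ n →
      data = pre ++ rest →
      ((∃ x, rest.head? = some x ∧ x ≠ "__") → (pre = [] ∨ pre.getLast? = some "__")) →
      bGo pre.isEmpty rest = idxFilt data pre.length rest := by
  intro n
  induction n with
  | zero =>
    intro rest pre hlen hd hinv
    have : rest = [] := List.length_eq_zero_iff.mp (by omega)
    subst this
    simp [bGo, idxFilt]
  | succ n ih =>
    intro rest pre hlen hd hinv
    cases rest with
    | nil => simp [bGo, idxFilt]
    | cons x t =>
      by_cases hx : x = "__"
      · -- marker run: kept whole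
        have hrun_cons : (x :: t).takeWhile (fun y => y == "__") =
            x :: t.takeWhile (fun y => y == "__") := by simp [List.takeWhile, hx]
        have hdrop_eq : (x :: t).dropWhile (fun y => y == "__") =
            t.dropWhile (fun y => y == "__") := by simp [List.dropWhile, hx]
        rw [bGo, if_pos hx]
        set run := (x :: t).takeWhile (fun y => y == "__") with hrun
        set rest' := (x :: t).dropWhile (fun y => y == "__") with hrest'
        have hsplit : run ++ rest' = x :: t := List.takeWhile_append_dropWhile
        have hrun_ne : run ≠ [] := by rw [hrun_cons]; simp
        have hall : ∀ y ∈ run, y = "__" := by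
          intro y hy
          simpa using List.mem_takeWhile_imp hy
        rw [show idxFilt data pre.length (x :: t) = idxFilt data pre.length (run ++ rest') by
            rw [hsplit],
          idxFilt_markers data run rest' hall]
        congr 1
        have hpre' : (pre ++ run).isEmpty = false := by
          simp [hrun_ne]
        rw [show (false : Bool) = (pre ++ run).isEmpty by rw [hpre']]
        rw [show pre.length + run.length = (pre ++ run).length by simp]
        apply ih rest' (pre ++ run)
        · have h1 : (List.dropWhile (fun y => y == "__") (x :: t)).length ≤ t.length := by
            simp only [List.dropWhile, show ((x == "__") : Bool) = true by simp [hx]]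
            exact List.length_dropWhile_le _ _
          exact Nat.le_trans h1 (by simpa using Nat.le_of_succ_le_succ hlen)
        · rw [hd, ← hsplit]; simp
        · intro _
          right
          rw [List.getLast?_append_of_ne_nil pre hrun_ne]
          exact getLast?_all_marker run hrun_ne hall
      · -- non-marker run: trimmed at its marker-facing edges
        have hpx : (x != "__") = true := by simp [hx]
        rw [bGo, if_neg hx]
        set run := (x :: t).takeWhile (fun y => y != "__") with hrun
        set rest' := (x :: t).dropWhile (fun y => y != "__") with hrest'
        have hsplit : run ++ rest' = x :: t := List.takeWhile_append_dropWhile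
        have hrun_ne : run ≠ [] := by
          rw [hrun, show (x :: t).takeWhile (fun y => y != "__") =
            x :: t.takeWhile (fun y => y != "__") by simp [List.takeWhile, hpx]]
          simp
        have hall : ∀ y ∈ run, y ≠ "__" := by
          intro y hy
          simpa using List.mem_takeWhile_imp hy
        have hrest : rest' = [] ∨ rest'.head? = some "__" := by
          cases hre : rest'.head? with
          | none => exact Or.inl (by simpa using hre)
          | some z =>
            right
            have hthis := List.head?_dropWhile_not (fun y => y != "__") (x :: t)
            have hre' : (List.dropWhile (fun y => y != "__") (x :: t)).head? = some z := hre
            rw [hre'] at hthis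
            simp only [bne_eq_false_iff_eq] at hthis
            rw [hthis]
        have hpre : pre = [] ∨ pre.getLast? = some "__" := hinv ⟨x, rfl, hx⟩
        have hd' : data = pre ++ run ++ rest' := by rw [hd, ← hsplit]; simp
        rw [show idxFilt data pre.length (x :: t) = idxFilt data pre.length (run ++ rest') by
            rw [hsplit],
          idxFilt_run data rest' hrest run pre hd' hrun_ne hall hpre]
        dsimp only
        congr 1
        have hpre' : (pre ++ run).isEmpty = false := by
          simp [hrun_ne]
        rw [show (false : Bool) = (pre ++ run).isEmpty by rw [hpre']]
        rw [show pre.length + run.length = (pre ++ run).length by simp]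
        apply ih rest' (pre ++ run)
        · have h1 : (List.dropWhile (fun y => y != "__") (x :: t)).length ≤ t.length := by
            simp only [List.dropWhile, hpx]
            exact List.length_dropWhile_le _ _
          exact Nat.le_trans h1 (by simpa using Nat.le_of_succ_le_succ hlen)
        · rw [hd, ← hsplit]; simp
        · rintro ⟨z, hz, hzne⟩
          rcases hrest with hre | hre
          · rw [hre] at hz; simp at hz
          · rw [hre] at hz
            exact absurd (Option.some.inj hz).symm hzne

-- ===== VERDICT =====
theorem remove_direct_neighbors_only_py_spec : Claim_equal_remove_direct_neighbors_only_py := by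
  intro data _
  unfold Spec_remove_direct_neighbors_only_py remove_direct_neighbors_only_py_alt
  rw [A_eq_idxFilt]
  have := bGo_eq_idxFilt data data.length data [] le_rfl (by simp) (fun _ => Or.inl rfl)
  simpa using this.symm
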